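-- pv_equiv track=rewrite | github.com/Torja99/Tana | Tana-Assistant/gui.py | split_for_type_writer_effect
-- ===== SOURCE A (Python) =====
-- def split_for_type_writer_effect(string):
--     list = []
--     for index in range(len(string)):
--
--         if index == 0:
--             list.append(string[index])
--         else:
--             list.append(list[index-1] + string[index])
--
--     return list
-- ===== SOURCE B (Python) =====
-- def split_for_type_writer_effect(string):
--     return [string[:i + 1] for i in range(len(string))]
-- ===== Notes on version B (the rewrite author's own statement) =====
-- stated objective: simpler
-- what changed: Replaces the accumulator loop that extends the previously built list element (list[index-1] + string[index]) with a direct per-index slice string[:i+1], so no running state or back-reference into the output list is kept.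
import Mathlib
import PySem

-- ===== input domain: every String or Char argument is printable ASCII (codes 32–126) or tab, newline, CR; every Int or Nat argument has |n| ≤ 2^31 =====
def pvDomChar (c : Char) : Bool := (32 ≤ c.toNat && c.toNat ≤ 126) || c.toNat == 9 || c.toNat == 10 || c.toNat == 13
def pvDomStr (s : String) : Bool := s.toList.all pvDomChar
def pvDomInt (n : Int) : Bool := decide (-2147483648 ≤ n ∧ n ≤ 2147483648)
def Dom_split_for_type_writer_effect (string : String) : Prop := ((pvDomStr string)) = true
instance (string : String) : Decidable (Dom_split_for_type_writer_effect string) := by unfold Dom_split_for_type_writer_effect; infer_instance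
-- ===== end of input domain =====

-- ===== PORT A =====
-- B replaces A's accumulator loop (extending list[index-1]) with independent slices string[:i+1]; objective: simpler.
-- Literal port of A: foldl over range(len(string)) carrying the output list,
-- reading back list[index-1] and string[index] (both always in range by construction).
def aLoopStep (s : List Char) (lst : List (List Char)) (index : Int) : List (List Char) :=
  if index == 0 then lst ++ [[PySem.List.pyGetD s index ' ']]
  else lst ++ [PySem.List.pyGetD lst (index - 1) [] ++ [PySem.List.pyGetD s index ' ']]

def split_for_type_writer_effect (string : String) : List String :=
  ((PySem.List.pyRange 0 (PySem.Str.len string : Int) 1).foldl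
      (aLoopStep string.toList) []).map String.ofList

-- ===== PORT B =====
def split_for_type_writer_effect_alt (string : String) : List String :=
  (PySem.List.pyRange 0 (PySem.Str.len string : Int) 1).map
    (fun i => String.ofList (PySem.Chars.slice string.toList none (some (i + 1))))

-- ===== PRECONDITION & SPEC =====
def Spec_split_for_type_writer_effect (string : String) (out : List String) : Prop := out = split_for_type_writer_effect_alt string
instance (string : String) (out : List String) : Decidable (Spec_split_for_type_writer_effect string out) := by unfold Spec_split_for_type_writer_effect; infer_instance

-- ===== CLAIM (what is proved, stated in full; the proofs are below) =====
def Claim_equal_split_for_type_writer_effect : Prop := ∀ (string : String), Dom_split_for_type_writer_effect string → Spec_split_for_type_writer_effect string (split_for_type_writer_effect string)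

-- ===== LEMMAS AND PROOFS =====

-- A's loop, run over the first m indices, produces exactly the first m prefixes.
theorem aLoop_prefixes (s : List Char) (m : Nat) (hm : m ≤ s.length) :
    ((List.range m).map (fun (k : Nat) => (k : Int))).foldl (aLoopStep s) []
      = (List.range m).map (fun k => s.take (k + 1)) := by
  induction m with
  | zero => simp
  | succ m ih =>
      have hm' : m ≤ s.length := Nat.le_of_succ_le hm
      rw [List.range_succ, List.map_append, List.foldl_append, ih hm',
        List.map_append]
      simp only [List.map_cons, List.map_nil, List.foldl_cons, List.foldl_nil]
      unfold aLoopStep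
      rcases Nat.eq_zero_or_pos m with h0 | hpos
      · subst h0
        simp only [Nat.cast_zero, beq_self_eq_true, if_true, PySem.List.pyGetD_zero]
        simp [List.take_add_one, List.getD, (List.getElem?_eq_some_iff).2 ⟨hm, rfl⟩]
      · have hne : ((m : Int) == 0) = false := by
          simp; omega
        rw [hne]
        simp only [Bool.false_eq_true, if_false]
        have h1 : (m : Int) - 1 = ((m - 1 : Nat) : Int) := by omega
        rw [h1, PySem.List.pyGetD_natCast, PySem.List.pyGetD_natCast,
          PySem.List.getD_map_range _ _ _ _ (by omega)]
        have : s.getD m ' ' = s[m] := List.getD_eq_getElem s ' ' hm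
        rw [this]
        have htk : s.take (m - 1 + 1) = s.take m := by
          congr 1; omega
        rw [htk, ← List.take_concat_get (l := s) (h := hm)]
        simp [List.concat_eq_append]

theorem split_for_type_writer_effect_spec : Claim_equal_split_for_type_writer_effect := by
  unfold Claim_equal_split_for_type_writer_effect
  intro string _
  unfold Spec_split_for_type_writer_effect split_for_type_writer_effect
    split_for_type_writer_effect_alt
  rw [PySem.Str.len_eq, PySem.List.pyRange_zero_natCast,
    aLoop_prefixes string.toList string.toList.length le_rfl,
    List.map_map, List.map_map]
  apply List.map_congr_left
  intro k hk
  simp only [Function.comp]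
  have : ((k : Int) + 1) = ((k + 1 : Nat) : Int) := by omega
  rw [PySem.Chars.slice_eq_listSlice, this, PySem.List.slice_to_natCast]
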